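-- pv_equiv track=rewrite | github.com/piodoi/proManage | backend/app/routes/env_routes.py | mask_secret_value
-- ===== SOURCE A (Python) =====
-- def mask_secret_value(value: str) -> str:
--     """
--     Partially mask a secret value for display.
--     First 8 characters are unmasked, then 1/3 of remaining chars are replaced with *.
--     """
--     if not value or len(value) <= 8:
--         return value
--
--     # First 8 chars unmasked
--     prefix = value[:8]
--     rest = value[8:]
--
--     # Replace every 3rd character with *
--     masked_rest = ""
--     for i, char in enumerate(rest):
--         if i % 3 == 0:
--             masked_rest += "*"
--         else:
--             masked_rest += char
--
--     return prefix + masked_rest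
-- ===== SOURCE B (Python) =====
-- def mask_secret_value(value: str) -> str:
--     """
--     Partially mask a secret value for display.
--     First 8 characters are unmasked, then 1/3 of remaining chars are replaced with *.
--     """
--     if not value or len(value) <= 8:
--         return value
--     out = []
--     rest = value[8:]
--     while rest:
--         out.append("*")
--         out.append(rest[1:3])
--         rest = rest[3:]
--     return value[:8] + "".join(out)
-- ===== Notes on version B (the rewrite author's own statement) =====
-- stated objective: alternative
-- what changed: Replaces the per-character enumerate loop with its index-mod-3 test and character-by-character string concatenation by a chunk-consuming while loop that emits a star plus the next two characters per 3-character group and joins once at the end.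
import Mathlib
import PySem

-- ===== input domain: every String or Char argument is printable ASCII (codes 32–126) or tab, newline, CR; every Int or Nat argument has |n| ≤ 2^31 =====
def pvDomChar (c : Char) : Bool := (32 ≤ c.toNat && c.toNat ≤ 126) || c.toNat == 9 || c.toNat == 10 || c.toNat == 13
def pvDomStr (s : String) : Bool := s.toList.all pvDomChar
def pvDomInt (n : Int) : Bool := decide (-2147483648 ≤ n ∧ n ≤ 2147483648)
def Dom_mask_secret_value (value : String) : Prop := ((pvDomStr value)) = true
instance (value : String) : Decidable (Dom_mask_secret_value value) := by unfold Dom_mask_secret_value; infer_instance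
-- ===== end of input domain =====

-- B replaces the per-character index-mod-3 loop by a chunk-of-3 consuming while loop joined once at the end (alternative decomposition).

-- ===== PORT A =====
def mask_secret_value (value : String) : String :=
  let cs := value.toList
  if cs.isEmpty || cs.length ≤ 8 then value
  else
    let pfx := PySem.List.slice cs none (some 8)
    let rest := PySem.List.slice cs (some 8) none
    let masked := (PySem.List.enumerate rest).foldl
      (fun acc p => if PySem.Int.mod p.1 3 = 0 then acc ++ ['*'] else acc ++ [p.2]) []
    String.ofList (pfx ++ masked)

-- ===== PORT B =====
-- while rest: out += ["*", rest[1:3]]; rest = rest[3:]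
def maskLoop (rest : List Char) (out : List (List Char)) : List (List Char) :=
  if h : rest.isEmpty then out
  else
    maskLoop (PySem.List.slice rest (some 3) none)
      (out ++ [['*'], PySem.List.slice rest (some 1) (some 3)])
termination_by rest.length
decreasing_by
  rw [PySem.List.slice_from rest (by norm_num)]
  cases rest with
  | nil => simp at h
  | cons a t =>
      show (List.drop (3:Int).toNat (a :: t)).length < (a :: t).length
      simp only [List.length_drop, List.length_cons]
      omega

def mask_secret_value_alt (value : String) : String :=
  let cs := value.toList
  if cs.isEmpty || cs.length ≤ 8 then value
  else
    String.ofList (PySem.List.slice cs none (some 8) ++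
      PySem.Chars.join [] (maskLoop (PySem.List.slice cs (some 8) none) []))

-- ===== PRECONDITION & SPEC =====
def Spec_mask_secret_value (value : String) (out : String) : Prop := out = mask_secret_value_alt value
instance (value : String) (out : String) : Decidable (Spec_mask_secret_value value out) := by unfold Spec_mask_secret_value; infer_instance

-- ===== CLAIM (what is proved, stated in full; the proofs are below) =====
def Claim_equal_mask_secret_value : Prop := ∀ (value : String), Dom_mask_secret_value value → Spec_mask_secret_value value (mask_secret_value value)

-- ===== LEMMAS AND PROOFS =====

-- characterization of A's per-character loop: index k, star every k ≡ 0 (mod 3)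
def mskA (k : Nat) : List Char → List Char
  | [] => []
  | c :: t => (if k % 3 = 0 then '*' else c) :: mskA (k + 1) t

theorem enum_foldl_eq (t : List Char) : ∀ (k : Nat) (acc : List Char),
    (PySem.List.enumerate t (k : Int)).foldl
      (fun acc p => if PySem.Int.mod p.1 3 = 0 then acc ++ ['*'] else acc ++ [p.2]) acc
      = acc ++ mskA k t := by
  induction t with
  | nil => intro k acc; simp [PySem.List.enumerate, mskA]
  | cons c t ih =>
    intro k acc
    have hcast : (k : Int) + 1 = ((k + 1 : Nat) : Int) := by push_cast; ring
    have hmod : PySem.Int.mod (k : Int) 3 = ((k % 3 : Nat) : Int) :=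
      PySem.Int.mod_natCast k 3
    simp only [PySem.List.enumerate, List.foldl_cons, hcast, hmod]
    rw [ih]
    by_cases h : k % 3 = 0
    · rw [if_pos (by exact_mod_cast h)]; simp [mskA, h]
    · rw [if_neg (by exact_mod_cast h)]; simp [mskA, h]

theorem mskA_add3 (t : List Char) : ∀ k, mskA (k + 3) t = mskA k t := by
  induction t with
  | nil => intro k; simp [mskA]
  | cons c t ih =>
    intro k
    have : (k + 3) % 3 = k % 3 := by omega
    simp only [mskA, this]
    have := ih (k + 1)
    rw [show k + 3 + 1 = k + 1 + 3 by ring, this]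

theorem mskA_zero_chunk (a : Char) (t : List Char) :
    mskA 0 (a :: t) = '*' :: (t.take 2 ++ mskA 0 (t.drop 2)) := by
  match t with
  | [] => simp [mskA]
  | [b] => simp [mskA]
  | b :: c :: u =>
    simp only [mskA, List.take, List.drop]
    norm_num
    exact mskA_add3 u 0

theorem join_empty_sep (l : List (List Char)) : PySem.Chars.join [] l = l.flatten := by
  induction l with
  | nil => simp [PySem.Chars.join_nil]
  | cons p rest ih =>
    cases rest with
    | nil => simp [PySem.Chars.join_singleton]
    | cons q r => rw [PySem.Chars.join_cons_cons]; simp [List.flatten] at ih ⊢; exact ih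

theorem maskLoop_flatten (n : Nat) : ∀ (t : List Char), t.length ≤ n → ∀ (out : List (List Char)),
    (maskLoop t out).flatten = out.flatten ++ mskA 0 t := by
  induction n with
  | zero =>
    intro t ht out
    have : t = [] := List.eq_nil_of_length_eq_zero (Nat.le_zero.mp ht)
    subst this
    rw [maskLoop]; simp [mskA]
  | succ n ih =>
    intro t ht out
    rw [maskLoop]
    cases t with
    | nil => simp [mskA]
    | cons a t' =>
      simp only [List.isEmpty_cons, dite_false, Bool.false_eq_true]
      rw [PySem.List.slice_from _ (by norm_num : (0:Int) ≤ 3)]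
      have h13 : PySem.List.slice (a :: t') (some 1) (some 3) = t'.take 2 := by
        have := PySem.List.slice_natCast (a :: t') 1 3
        simpa using this
      have hdrop : (a :: t').drop (3 : Int).toNat = t'.drop 2 := by simp
      rw [h13, hdrop, ih _ (by simp at ht ⊢; omega)]
      rw [mskA_zero_chunk]
      simp

-- ===== VERDICT (by name: the statement is the Claim_ definition above) =====
theorem mask_secret_value_spec : Claim_equal_mask_secret_value := by
  intro value _
  unfold Spec_mask_secret_value mask_secret_value mask_secret_value_alt
  simp only []
  split_ifs with h
  · rfl
  · congr 1
    congr 1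
    have he := enum_foldl_eq (PySem.List.slice value.toList (some 8) none) 0 []
    simp only [Nat.cast_zero] at he
    rw [he, join_empty_sep,
      maskLoop_flatten (PySem.List.slice value.toList (some 8) none).length _ (le_refl _)]
    simp
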